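-- pv_equiv track=rewrite | github.com/MrBinit/UniGraph | app/services/web_retrieval_service.py | _wrap_words
-- ===== SOURCE A (Python) =====
-- def _wrap_words(text: str, max_chars: int) -> list[str]:
--     words = text.split()
--     if not words:
--         return []
--     parts: list[str] = []
--     current = words[0]
--     for word in words[1:]:
--         candidate = f"{current} {word}"
--         if len(candidate) <= max_chars:
--             current = candidate
--         else:
--             parts.append(current)
--             current = word
--     parts.append(current)
--     return parts
-- ===== SOURCE B (Python) =====
-- def _wrap_words(text: str, max_chars: int) -> list[str]:
--     words = text.split()
--     if not words:
--         return []
--     # Pass 1: compute the start index of every line purely from word lengths.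
--     starts = [0]
--     run = len(words[0])
--     for j in range(1, len(words)):
--         w = len(words[j])
--         if run + 1 + w <= max_chars:
--             run += 1 + w
--         else:
--             starts.append(j)
--             run = w
--     starts.append(len(words))
--     # Pass 2: materialize each line in one join per line.
--     return [" ".join(words[a:b]) for a, b in zip(starts, starts[1:])]
-- ===== Notes on version B (the rewrite author's own statement) =====
-- stated objective: alternative
-- what changed: B replaces A's single pass that grows line strings by repeated concatenation with two staged passes: first a scan over word lengths that computes the break indices arithmetically (no strings touched), then one ' '.join per line over the word slices.
import Mathlib
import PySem

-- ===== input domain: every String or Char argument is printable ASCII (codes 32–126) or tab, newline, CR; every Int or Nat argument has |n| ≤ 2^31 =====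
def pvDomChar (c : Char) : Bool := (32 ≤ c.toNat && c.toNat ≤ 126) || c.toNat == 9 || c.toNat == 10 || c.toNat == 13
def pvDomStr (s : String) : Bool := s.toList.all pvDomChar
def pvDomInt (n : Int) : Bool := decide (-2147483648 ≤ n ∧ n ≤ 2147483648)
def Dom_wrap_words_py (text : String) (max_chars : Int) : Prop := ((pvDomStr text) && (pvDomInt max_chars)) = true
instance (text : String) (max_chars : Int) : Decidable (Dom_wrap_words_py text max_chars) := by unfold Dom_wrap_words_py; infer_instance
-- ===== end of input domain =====

-- B replaces A's string-accumulating single pass with two staged passes: a scan over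
-- word lengths computing line-break indices, then one join per line; same cost,
-- alternative structure.


-- ===== PORT A =====
-- literal transliteration of A: fold over words[1:] with state (parts, current)
def wrap_words_py (text : String) (max_chars : Int) : List String :=
  let words := PySem.Str.split₀ text
  match words with
  | [] => []
  | w0 :: rest =>
    let st := rest.foldl (fun (st : List String × String) word =>
      let candidate := st.2 ++ " " ++ word
      if PySem.Str.len candidate ≤ max_chars then (st.1, candidate)
      else (st.1 ++ [st.2], word)) (([] : List String), w0)
    st.1 ++ [st.2]

-- ===== PORT B =====
-- literal transliteration of B: pass 1 folds over range(1, len(words)) computing the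
-- line-start indices from word lengths only; pass 2 joins the word slice of each
-- consecutive start pair.  (words[j] is always in range here, so pyGetD's default is
-- never used; starts[1:] is List.tail.)
def wrap_words_py_alt (text : String) (max_chars : Int) : List String :=
  let words := PySem.Str.split₀ text
  match words with
  | [] => []
  | w0 :: _ =>
    let n : Int := (words.length : Int)
    let st := (PySem.List.pyRange 1 n 1).foldl
      (fun (st : List Int × Int) j =>
        let w := PySem.Str.len (PySem.List.pyGetD words j "")
        if st.2 + 1 + w ≤ max_chars then (st.1, st.2 + 1 + w)
        else (st.1 ++ [j], w))
      ([(0 : Int)], PySem.Str.len w0)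
    let starts := st.1 ++ [n]
    (starts.zip starts.tail).map (fun ab =>
      PySem.Str.join " " (PySem.List.slice words (some ab.1) (some ab.2)))

-- ===== PRECONDITION & SPEC =====
def Spec_wrap_words_py (text : String) (max_chars : Int) (out : List String) : Prop := out = wrap_words_py_alt text max_chars
instance (text : String) (max_chars : Int) (out : List String) : Decidable (Spec_wrap_words_py text max_chars out) := by unfold Spec_wrap_words_py; infer_instance

-- ===== CLAIM (what is proved, stated in full; the proofs are below) =====
def Claim_equal_wrap_words_py : Prop := ∀ (text : String) (max_chars : Int), Dom_wrap_words_py text max_chars → Spec_wrap_words_py text max_chars (wrap_words_py text max_chars)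

-- ===== LEMMAS AND PROOFS =====

-- number of following words absorbed into the current line (greedy fit count)
def fitCount (max_chars total : Int) : List String → Nat
  | [] => 0
  | w :: rest =>
    if total + 1 + PySem.Str.len w ≤ max_chars then
      fitCount max_chars (total + 1 + PySem.Str.len w) rest + 1
    else 0

-- common bridge: greedy wrap expressed as chunk-taking recursion with one join per line
def wrapC (max_chars : Int) : List String → List String
  | [] => []
  | w :: rest =>
    let m := fitCount max_chars (PySem.Str.len w) rest
    PySem.Str.join " " ((w :: rest).take (m + 1)) :: wrapC max_chars (rest.drop m)
termination_by ws => ws.length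
decreasing_by
  simp only [List.length_cons]
  have := List.length_drop (l := rest) (i := fitCount max_chars (PySem.Str.len w) rest)
  omega

-- the break indices B's first pass computes, as a structural recursion on the suffix
def breaksRec (max_chars : Int) : Int → Int → List String → List Int
  | _, _, [] => []
  | total, j, w :: rest =>
    if total + 1 + PySem.Str.len w ≤ max_chars then
      breaksRec max_chars (total + 1 + PySem.Str.len w) (j + 1) rest
    else j :: breaksRec max_chars (PySem.Str.len w) (j + 1) rest

-- B's second pass, abstracted over the start list
def mkLines (words : List String) (starts : List Int) : List String :=
  (starts.zip starts.tail).map (fun ab =>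
    PySem.Str.join " " (PySem.List.slice words (some ab.1) (some ab.2)))

theorem len_sep_append (a b : String) :
    PySem.Str.len (a ++ " " ++ b) = PySem.Str.len a + 1 + PySem.Str.len b := by
  simp
  omega

theorem join_singleton_str (c : String) : PySem.Str.join " " [c] = c := by
  apply String.toList_inj.mp
  simp [PySem.Str.toList_join, PySem.Chars.join, List.intercalate]

theorem join_absorb (c w : String) (t : List String) :
    PySem.Str.join " " (c :: w :: t) = PySem.Str.join " " ((c ++ " " ++ w) :: t) := by
  apply String.toList_inj.mp
  cases t with
  | nil =>
    simp [PySem.Str.toList_join, PySem.Chars.join, List.intercalate]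
  | cons x xs =>
    rw [PySem.Str.toList_join, PySem.Str.toList_join]
    simp only [List.map_cons]
    rw [PySem.Chars.join_cons_cons, PySem.Chars.join_cons_cons, PySem.Chars.join_cons_cons]
    simp

-- A's fold equals the chunk recursion wrapC
theorem foldA_eq (max_chars : Int) (ws : List String) :
    ∀ (parts : List String) (cur : String),
      (ws.foldl (fun (st : List String × String) word =>
          let candidate := st.2 ++ " " ++ word
          if PySem.Str.len candidate ≤ max_chars then (st.1, candidate)
          else (st.1 ++ [st.2], word)) (parts, cur)).1 ++
        [(ws.foldl (fun (st : List String × String) word =>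
          let candidate := st.2 ++ " " ++ word
          if PySem.Str.len candidate ≤ max_chars then (st.1, candidate)
          else (st.1 ++ [st.2], word)) (parts, cur)).2]
      = parts ++ PySem.Str.join " " (cur :: ws.take (fitCount max_chars (PySem.Str.len cur) ws))
          :: wrapC max_chars (ws.drop (fitCount max_chars (PySem.Str.len cur) ws)) := by
  induction ws with
  | nil =>
    intro parts cur
    simp [fitCount, wrapC, join_singleton_str]
  | cons w rest ih =>
    intro parts cur
    simp only [List.foldl_cons, fitCount]
    rw [len_sep_append cur w]
    by_cases h : PySem.Str.len cur + 1 + PySem.Str.len w ≤ max_chars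
    · simp only [if_pos h]
      rw [ih parts (cur ++ " " ++ w)]
      rw [len_sep_append cur w]
      simp only [List.take_succ_cons, List.drop_succ_cons]
      rw [join_absorb]
    · simp only [if_neg h]
      rw [ih (parts ++ [cur]) w]
      simp only [List.take_zero, List.drop_zero]
      rw [wrapC, join_singleton_str]
      simp

-- B's fold produces exactly breaksRec
theorem foldB_eq (max_chars : Int) (words : List String) :
    ∀ (ws : List String) (j : Nat) (S : List Int) (run : Int),
      words.drop j = ws → j + ws.length = words.length →
      ((PySem.List.pyRange (j : Int) (words.length : Int) 1).foldl
        (fun (st : List Int × Int) i =>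
          let w := PySem.Str.len (PySem.List.pyGetD words i "")
          if st.2 + 1 + w ≤ max_chars then (st.1, st.2 + 1 + w)
          else (st.1 ++ [i], w)) (S, run)).1
      = S ++ breaksRec max_chars run (j : Int) ws := by
  intro ws
  induction ws with
  | nil =>
    intro j S run hdrop hlen
    simp only [List.length_nil, Nat.add_zero] at hlen
    rw [PySem.List.pyRange_one_eq_nil (by omega)]
    simp [breaksRec]
  | cons w rest ih =>
    intro j S run hdrop hlen
    have hj : j < words.length := by
      simp only [List.length_cons] at hlen; omega
    rw [PySem.List.pyRange_one_cons (by exact_mod_cast hj)]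
    have hget : PySem.List.pyGetD words (j : Int) "" = w := by
      have h0 : words[j]? = some w := by
        have := List.getElem?_drop (xs := words) (i := j) (j := 0)
        rw [hdrop] at this
        simpa using this.symm
      rw [PySem.List.pyGetD_natCast]
      simp [List.getD, h0]
    have hdrop' : words.drop (j + 1) = rest := by
      have : words.drop (j + 1) = (words.drop j).drop 1 := by
        rw [List.drop_drop]
      rw [this, hdrop]; rfl
    have hlen' : (j + 1) + rest.length = words.length := by
      simp only [List.length_cons] at hlen; omega
    simp only [List.foldl_cons, hget, breaksRec]
    by_cases h : run + 1 + PySem.Str.len w ≤ max_chars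
    · simp only [if_pos h]
      have := ih (j + 1) S (run + 1 + PySem.Str.len w) hdrop' hlen'
      push_cast at this ⊢
      exact this
    · simp only [if_neg h]
      have := ih (j + 1) (S ++ [(j : Int)]) (PySem.Str.len w) hdrop' hlen'
      push_cast at this ⊢
      rw [this]
      simp
-- helper: one step of B's second pass
theorem mkLines_cons (words : List String) (a b : Int) (rest : List Int) :
    mkLines words (a :: b :: rest)
      = PySem.Str.join " " (PySem.List.slice words (some a) (some b)) :: mkLines words (b :: rest) := by
  simp [mkLines]

theorem slice_natCast_eq (words : List String) (s j : Nat) :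
    PySem.List.slice words (some (s : Int)) (some (j : Int))
      = (words.drop s).take (j - s) := by
  rw [PySem.List.slice_toNat words (by positivity) (by positivity)]
  simp

-- B's two passes equal the chunk recursion wrapC
theorem mk_eq_wrapC (max_chars : Int) (words : List String) :
    ∀ (ws : List String) (j s : Nat) (total : Int),
      s < j → j ≤ words.length → words.drop j = ws →
      mkLines words ((s : Int) :: (breaksRec max_chars total (j : Int) ws ++ [(words.length : Int)]))
      = PySem.Str.join " " ((words.drop s).take (j - s + fitCount max_chars total ws))
          :: wrapC max_chars (ws.drop (fitCount max_chars total ws)) := by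
  intro ws
  induction ws with
  | nil =>
    intro j s total hsj hjn hdrop
    have hj : j = words.length := by
      have := List.drop_eq_nil_iff.mp hdrop
      omega
    subst hj
    simp only [breaksRec, List.nil_append, fitCount, Nat.add_zero, List.drop_nil, wrapC]
    rw [mkLines_cons, slice_natCast_eq]
    simp [mkLines]
  | cons x r ih =>
    intro j s total hsj hjn hdrop
    have hj : j < words.length := by
      have := congrArg List.length hdrop
      simp at this; omega
    have hdrop' : words.drop (j + 1) = r := by
      have : words.drop (j + 1) = (words.drop j).drop 1 := by
        rw [List.drop_drop]
      rw [this, hdrop]; rfl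
    simp only [breaksRec, fitCount]
    by_cases h : total + 1 + PySem.Str.len x ≤ max_chars
    · simp only [if_pos h]
      have := ih (j + 1) s (total + 1 + PySem.Str.len x) (by omega) (by omega) hdrop'
      push_cast at this ⊢
      rw [this]
      have harith : j + 1 - s + fitCount max_chars (total + 1 + PySem.Str.len x) r
          = j - s + (fitCount max_chars (total + 1 + PySem.Str.len x) r + 1) := by omega
      rw [harith]
      simp
    · simp only [if_neg h]
      rw [List.cons_append, mkLines_cons, slice_natCast_eq]
      have := ih (j + 1) j (PySem.Str.len x) (by omega) (by omega) hdrop'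
      push_cast at this ⊢
      rw [this]
      have h1 : j + 1 - j + fitCount max_chars (PySem.Str.len x) r
          = fitCount max_chars (PySem.Str.len x) r + 1 := by omega
      rw [h1, hdrop]
      simp [wrapC]

-- ===== VERDICT (by name: the statement is the Claim_ definition above) =====
theorem wrap_words_py_spec : Claim_equal_wrap_words_py := by
  intro text max_chars _
  unfold Spec_wrap_words_py wrap_words_py wrap_words_py_alt
  cases h : PySem.Str.split₀ text with
  | nil => rfl
  | cons w0 rest =>
    simp only []
    rw [foldA_eq max_chars rest [] w0]
    have hB := foldB_eq max_chars (w0 :: rest) rest 1 [(0 : Int)] (PySem.Str.len w0)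
      (by rfl) (by simp [Nat.add_comm])
    push_cast at hB
    rw [hB]
    have hmk := mk_eq_wrapC max_chars (w0 :: rest) rest 1 0 (PySem.Str.len w0)
      (by omega) (by simp) (by rfl)
    push_cast at hmk
    have hmk' : mkLines (w0 :: rest)
        ((0 : Int) :: (breaksRec max_chars (PySem.Str.len w0) 1 rest ++ [((w0 :: rest).length : Int)]))
      = PySem.Str.join " " (w0 :: rest.take (fitCount max_chars (PySem.Str.len w0) rest))
          :: wrapC max_chars (rest.drop (fitCount max_chars (PySem.Str.len w0) rest)) := by
      rw [hmk]
      simp [Nat.add_comm 1]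
    rw [List.nil_append]
    exact hmk'.symm
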